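-- pv_equiv track=rewrite | github.com/Angelia0hh/NPI-RGCNAE | sequence_encoder.py | get_all_kmers
-- ===== SOURCE A (Python) =====
-- from itertools import product
--
-- def get_all_kmers(k_upper_limit, isStruc=True):
--     '''
--     :param k_upper_limit:k的变化范围的上限
--     :param isStruc:是否为二级结构
--     :return:所有用数字表示的kmer字典
--     '''
--     kmers_map = {}
--     if isStruc:
--         base = '012'
--     else:
--         base = '0123456'
--     for k in range(k_upper_limit):
--         kmers_map[k + 1] = []
--         for i in product(base, repeat=k + 1):
--             kmers_map[k + 1].append(''.join(i))
--     return kmers_map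
-- ===== SOURCE B (Python) =====
-- def get_all_kmers(k_upper_limit, isStruc=True):
--     base = '012' if isStruc else '0123456'
--     kmers_map = {}
--     level = ['']
--     for n in range(k_upper_limit):
--         level = [p + c for p in level for c in base]
--         kmers_map[n + 1] = level
--     return kmers_map
-- ===== Notes on version B (the rewrite author's own statement) =====
-- stated objective: simpler
-- what changed: Builds each k-mer level incrementally by extending the previous level with one trailing base character, instead of calling itertools.product from scratch for every length.
import Mathlib
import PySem

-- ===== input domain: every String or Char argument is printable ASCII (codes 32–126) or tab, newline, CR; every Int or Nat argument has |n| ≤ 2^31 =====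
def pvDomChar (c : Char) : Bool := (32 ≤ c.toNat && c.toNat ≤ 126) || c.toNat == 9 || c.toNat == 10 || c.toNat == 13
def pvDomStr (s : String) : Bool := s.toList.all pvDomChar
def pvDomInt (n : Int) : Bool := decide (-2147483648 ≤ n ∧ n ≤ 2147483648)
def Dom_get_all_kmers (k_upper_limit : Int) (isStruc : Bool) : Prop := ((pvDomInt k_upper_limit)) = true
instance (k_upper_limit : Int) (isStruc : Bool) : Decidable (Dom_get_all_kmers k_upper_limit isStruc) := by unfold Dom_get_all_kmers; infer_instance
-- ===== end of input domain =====

-- B replaces A's per-length itertools.product calls by growing each k-mer level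
-- from the previous one (prefix + base character); objective: simpler.


-- ===== PORT A =====
-- itertools.product(base, repeat=n): tuples of 1-char strings modeled as List Char
-- (leftmost position varies slowest, exactly product's order); ''.join of those
-- 1-char strings is String.ofList (exact).
def pvProd (base : List Char) : Nat → List (List Char)
  | 0 => [[]]
  | n + 1 => base.flatMap (fun c => (pvProd base n).map (fun t => c :: t))

-- dict keys k+1 are fresh and inserted in loop order, so the dict is the list of
-- (key, finished inner list) pairs appended in order.
def get_all_kmers (k_upper_limit : Int) (isStruc : Bool) : List (Int × List String) :=
  let base := if isStruc then "012".toList else "0123456".toList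
  (PySem.List.pyRange 0 k_upper_limit 1).foldl
    (fun m k =>
      m ++ [(k + 1, (pvProd base (k + 1).toNat).foldl (fun l t => l ++ [String.ofList t]) [])])
    []

-- ===== PORT B =====
def get_all_kmers_alt (k_upper_limit : Int) (isStruc : Bool) : List (Int × List String) :=
  let base := if isStruc then "012".toList else "0123456".toList
  ((PySem.List.pyRange 0 k_upper_limit 1).foldl
    (fun (acc : List (Int × List String) × List String) n =>
      let level := acc.2.flatMap (fun p => base.map (fun c => p ++ String.ofList [c]))
      (acc.1 ++ [(n + 1, level)], level))
    ([], [""])).1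

-- ===== PRECONDITION & SPEC =====
def Spec_get_all_kmers (k_upper_limit : Int) (isStruc : Bool) (out : List (Int × List String)) : Prop := out = get_all_kmers_alt k_upper_limit isStruc
instance (k_upper_limit : Int) (isStruc : Bool) (out : List (Int × List String)) : Decidable (Spec_get_all_kmers k_upper_limit isStruc out) := by unfold Spec_get_all_kmers; infer_instance

-- ===== CLAIM (what is proved, stated in full; the proofs are below) =====
def Claim_equal_get_all_kmers : Prop := ∀ (k_upper_limit : Int) (isStruc : Bool), Dom_get_all_kmers k_upper_limit isStruc → Spec_get_all_kmers k_upper_limit isStruc (get_all_kmers k_upper_limit isStruc)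

-- ===== LEMMAS AND PROOFS =====

-- appending one character on the right, stated in string form
theorem pvOfList_append_singleton (t : List Char) (c : Char) :
    String.ofList t ++ String.ofList [c] = String.ofList (t ++ [c]) :=
  String.toList_injective (by simp)

theorem pvFlatten_map_singleton {α β : Type} (f : α → β) (l : List α) :
    (l.map (fun x => [f x])).flatten = l.map f := by
  induction l <;> simp_all

-- product of n+1 copies = product of n copies, each extended by one trailing char
theorem pvProd_succ_right (base : List Char) (n : Nat) :
    pvProd base (n + 1) = (pvProd base n).flatMap (fun t => base.map (fun c => t ++ [c])) := by
  induction n with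
  | zero => simp [pvProd, List.flatMap_def, pvFlatten_map_singleton]
  | succ n ih =>
    calc pvProd base (n + 2)
        = base.flatMap (fun c => (pvProd base (n + 1)).map (fun t => c :: t)) := rfl
      _ = base.flatMap (fun c =>
            ((pvProd base n).flatMap (fun t => base.map (fun d => t ++ [d]))).map
              (fun t => c :: t)) := by rw [ih]
      _ = (base.flatMap (fun c => (pvProd base n).map (fun t => c :: t))).flatMap
            (fun t => base.map (fun d => t ++ [d])) := by
          simp [List.map_flatMap, List.flatMap_assoc, List.flatMap_map, List.map_map, Function.comp_def, List.cons_append]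
      _ = (pvProd base (n + 1)).flatMap (fun t => base.map (fun d => t ++ [d])) := rfl

-- the string level of length n
def pvLevel (base : List Char) (n : Nat) : List String :=
  (pvProd base n).map String.ofList

theorem pvLevel_zero (base : List Char) : pvLevel base 0 = [""] := rfl

theorem pvLevel_step (base : List Char) (n : Nat) :
    (pvLevel base n).flatMap (fun p => base.map (fun c => p ++ String.ofList [c]))
      = pvLevel base (n + 1) := by
  simp only [pvLevel, pvProd_succ_right, List.flatMap_map, List.map_flatMap,
    List.map_map, Function.comp_def, pvOfList_append_singleton]

theorem pvFoldl_append_map {α β : Type} (f : α → β) :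
    ∀ (xs : List α) (acc : List β),
      xs.foldl (fun l t => l ++ [f t]) acc = acc ++ xs.map f := by
  intro xs
  induction xs with
  | nil => simp
  | cons x xs ih => intro acc; simp [ih, List.append_assoc]

-- the common result, as a map over List.range
def pvSpec (base : List Char) (m : Nat) : List (Int × List String) :=
  List.map (fun (j : Nat) => ((j : Int) + 1, pvLevel base (j + 1))) (List.range m)

theorem pvA_fold (base : List Char) (m : Nat) :
    (List.map (fun j : Nat => (j : Int)) (List.range m)).foldl
      (fun acc k =>
        acc ++ [(k + 1, (pvProd base (k + 1).toNat).foldl (fun l t => l ++ [String.ofList t]) [])])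
      [] = pvSpec base m := by
  induction m with
  | zero => rfl
  | succ m ih =>
    rw [List.range_succ]
    simp only [List.map_append, List.foldl_append, ih, List.foldl_cons, List.foldl_nil]
    have h1 : ((m : Int) + 1).toNat = m + 1 := by omega
    rw [pvFoldl_append_map]
    simp [pvSpec, List.range_succ, h1, pvLevel, pvFlatten_map_singleton]

theorem pvB_fold (base : List Char) (m : Nat) :
    (List.map (fun j : Nat => (j : Int)) (List.range m)).foldl
      (fun (acc : List (Int × List String) × List String) n =>
        let level := acc.2.flatMap (fun p => base.map (fun c => p ++ String.ofList [c]))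
        (acc.1 ++ [(n + 1, level)], level))
      ([], [""]) = (pvSpec base m, pvLevel base m) := by
  induction m with
  | zero => simp [pvSpec, pvLevel_zero]
  | succ m ih =>
    rw [List.range_succ]
    simp only [List.map_append, List.foldl_append, ih, List.foldl_cons, List.foldl_nil,
      List.map_cons, List.map_nil]
    rw [pvLevel_step]
    simp [pvSpec, List.range_succ]

theorem pvRange_cast (k : Int) :
    PySem.List.pyRange 0 k 1 = List.map (fun j : Nat => (j : Int)) (List.range k.toNat) := by
  rw [PySem.List.pyRange_one]
  simp only [Int.sub_zero, zero_add]

-- ===== VERDICT (by name: the statement is the Claim_ definition above) =====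
theorem get_all_kmers_spec : Claim_equal_get_all_kmers := by
  intro k isStruc _
  unfold Spec_get_all_kmers get_all_kmers get_all_kmers_alt
  rw [pvRange_cast]
  dsimp only
  rw [pvA_fold, pvB_fold]
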